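-- pv_equiv track=rewrite | github.com/ppVon/cobblemon-academy-dex-site | scripts/dex_build.py | resolve_biome_selectors
-- ===== SOURCE A (Python) =====
-- def resolve_biome_selectors(selectors, tag_map):
--     """
--     selectors: list[str] ('minecraft:plains' or '#cobblemon:is_grassland')
--     Returns a sorted list[str] of concrete biome IDs with tags fully expanded (recursively).
--     """
--     if isinstance(selectors, str):
--         selectors = [selectors]
--     elif not isinstance(selectors, list):
--         selectors = []
--
--     resolved = set()
--     visiting = set()  # guard against cycles
--
--     def expand(sel):
--         if not isinstance(sel, str):
--             return
--         if sel.startswith("#"):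
--             if sel in visiting:
--                 return
--             visiting.add(sel)
--             for v in tag_map.get(sel, []):
--                 expand(v)
--             visiting.remove(sel)
--         else:
--             resolved.add(sel)
--
--     for s in selectors:
--         expand(s)
--
--     return sorted(resolved)
-- ===== SOURCE B (Python) =====
-- def resolve_biome_selectors(selectors, tag_map):
--     """
--     selectors: list[str] ('minecraft:plains' or '#cobblemon:is_grassland')
--     Returns a sorted list[str] of concrete biome IDs with tags fully expanded.
--     Two staged passes: (1) a BFS computes, once, the set of tags reachable
--     from the selectors (each tag dequeued/expanded at most once); (2) the
--     concrete ids among the selectors and among the children of the reached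
--     tags are collected and sorted.
--     """
--     if isinstance(selectors, str):
--         selectors = [selectors]
--     elif not isinstance(selectors, list):
--         selectors = []
--
--     # Phase 1: BFS closure over the tag graph.
--     seen = set()
--     tags = []
--     queue = [s for s in selectors if isinstance(s, str) and s.startswith("#")]
--     while queue:
--         t = queue.pop(0)
--         if t in seen:
--             continue
--         seen.add(t)
--         tags.append(t)
--         queue.extend(v for v in tag_map.get(t, [])
--                      if isinstance(v, str) and v.startswith("#"))
--
--     # Phase 2: collect concrete ids.
--     concrete = {s for s in selectors
--                 if isinstance(s, str) and not s.startswith("#")}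
--     for t in tags:
--         for v in tag_map.get(t, []):
--             if isinstance(v, str) and not v.startswith("#"):
--                 concrete.add(v)
--     return sorted(concrete)
-- ===== Notes on version B (the rewrite author's own statement) =====
-- stated objective: alternative
-- what changed: A expands tags by recursion guarded only by the current path (visiting set), so a tag shared by many paths is re-expanded once per path; B runs two staged passes: a BFS with a global seen set that computes the reachable-tag closure expanding each tag at most once, then a collection pass gathering the concrete ids among the selectors and among the children of the reached tags.
import Mathlib
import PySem

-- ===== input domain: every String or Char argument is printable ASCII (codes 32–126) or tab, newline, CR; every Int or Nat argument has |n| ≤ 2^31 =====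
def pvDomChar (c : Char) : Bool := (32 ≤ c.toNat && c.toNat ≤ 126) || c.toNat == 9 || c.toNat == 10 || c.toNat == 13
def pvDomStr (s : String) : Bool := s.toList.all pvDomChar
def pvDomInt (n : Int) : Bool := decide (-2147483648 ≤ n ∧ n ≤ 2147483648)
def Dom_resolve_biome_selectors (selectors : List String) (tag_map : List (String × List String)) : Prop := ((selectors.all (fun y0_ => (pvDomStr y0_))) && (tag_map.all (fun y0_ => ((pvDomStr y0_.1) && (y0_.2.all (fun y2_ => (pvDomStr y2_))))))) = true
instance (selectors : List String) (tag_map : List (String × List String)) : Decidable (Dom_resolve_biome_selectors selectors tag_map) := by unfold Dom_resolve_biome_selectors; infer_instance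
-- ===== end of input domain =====

-- B replaces A's path-guarded recursive expansion by two staged passes: a BFS with a global
-- seen set computing the reachable-tag closure (each tag expanded once), then a collection
-- pass gathering concrete ids; same sorted output is proved.

-- ===== PORT A =====
-- tag_map.get(sel, []) (dict lookup = first match in the association list)
def pvKids (tag_map : List (String × List String)) (sel : String) : List String :=
  PySem.Dict.getD (PySem.Dict.mk tag_map) sel []

-- termination helper: if sel is not a key, its child list is empty
theorem pvKids_of_not_mem (tag_map : List (String × List String)) (sel : String)
    (h : sel ∉ tag_map.map Prod.fst) : pvKids tag_map sel = [] := by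
  induction tag_map with
  | nil => rfl
  | cons p rest ih =>
      obtain ⟨k, v⟩ := p
      simp only [List.map_cons, List.mem_cons, not_or] at h
      simp only [pvKids, PySem.Dict.getD, PySem.Dict.get?_mk_cons] at ih ⊢
      rw [if_neg (by simpa using Ne.symm h.1)]
      exact ih h.2

-- termination helpers: adding a fresh key to the visited/seen set shrinks the count of
-- unvisited keys (pvCard_lt); adding a fresh non-key leaves it unchanged (pvCard_eq)
theorem pvCard_lt (tag_map : List (String × List String)) (V : PySem.Set String) (sel : String)
    (h2 : sel ∉ V) (hk : sel ∈ tag_map.map Prod.fst) :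
    ((tag_map.map Prod.fst).toFinset \ (PySem.Set.add V sel).toFinset).card
      < ((tag_map.map Prod.fst).toFinset \ V.toFinset).card := by
  apply Finset.card_lt_card
  constructor
  · intro a ha
    simp only [PySem.Set.add_of_not_mem h2, Finset.mem_sdiff, List.mem_toFinset,
      List.mem_append, List.mem_singleton, not_or] at ha ⊢
    exact ⟨ha.1, ha.2.1⟩
  · intro hsub
    have hmem : sel ∈ (tag_map.map Prod.fst).toFinset \ V.toFinset := by
      simp only [Finset.mem_sdiff, List.mem_toFinset]; exact ⟨hk, h2⟩
    have := hsub hmem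
    simp [PySem.Set.add_of_not_mem h2] at this

theorem pvCard_eq (tag_map : List (String × List String)) (V : PySem.Set String) (sel : String)
    (h2 : sel ∉ V) (hk : sel ∉ tag_map.map Prod.fst) :
    ((tag_map.map Prod.fst).toFinset \ (PySem.Set.add V sel).toFinset).card
      = ((tag_map.map Prod.fst).toFinset \ V.toFinset).card := by
  congr 1
  apply Finset.ext
  intro a
  simp only [Finset.mem_sdiff, List.mem_toFinset, PySem.Set.add_of_not_mem h2,
    List.mem_append, List.mem_singleton, not_or]
  constructor
  · rintro ⟨ha, hb, _⟩; exact ⟨ha, hb⟩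
  · rintro ⟨ha, hb⟩; exact ⟨ha, hb, fun hs => hk (hs ▸ ha)⟩

-- A's 'expand' over a LIST of selectors: 'visiting' threads through the list unchanged
-- (Python restores it after each call); a tag recurses over its children with sel added.
def pvExpandA (tag_map : List (String × List String)) (visiting : PySem.Set String)
    (resolved : PySem.Set String) : List String → PySem.Set String
  | [] => resolved
  | sel :: rest =>
      if PySem.Str.startswith sel "#" = true then
        if sel ∈ visiting then pvExpandA tag_map visiting resolved rest
        else pvExpandA tag_map visiting
               (pvExpandA tag_map (PySem.Set.add visiting sel) resolved (pvKids tag_map sel)) rest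
      else pvExpandA tag_map visiting (PySem.Set.add resolved sel) rest
  termination_by sels => ((((tag_map.map Prod.fst).toFinset \ visiting.toFinset).card, sels.length) : Nat × Nat)
  decreasing_by
    all_goals simp_wf
    · exact Prod.Lex.right _ (Nat.lt_succ_self _)
    · rename_i _ h2
      by_cases hk : sel ∈ tag_map.map Prod.fst
      · exact Prod.Lex.left _ _ (pvCard_lt tag_map visiting sel h2 hk)
      · rw [pvCard_eq tag_map visiting sel h2 hk, pvKids_of_not_mem tag_map sel hk]
        exact Prod.Lex.right _ (by simp)
    · exact Prod.Lex.right _ (Nat.lt_succ_self _)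
    · exact Prod.Lex.right _ (Nat.lt_succ_self _)

def resolve_biome_selectors (selectors : List String) (tag_map : List (String × List String)) : List String :=
  PySem.List.sorted (pvExpandA tag_map PySem.Set.empty PySem.Set.empty selectors) (fun x => x) false

-- ===== PORT B =====
def pvIsTag (s : String) : Bool := PySem.Str.startswith s "#"

-- Phase 1: BFS over the tag graph (queue.pop(0); seen is a global set, each tag expanded once)
def pvBfs (tag_map : List (String × List String)) (seen : PySem.Set String)
    (tags : List String) : List String → List String
  | [] => tags
  | t :: queue =>
      if t ∈ seen then pvBfs tag_map seen tags queue
      else pvBfs tag_map (PySem.Set.add seen t) (tags ++ [t])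
             (queue ++ (pvKids tag_map t).filter (fun v => pvIsTag v))
  termination_by queue => ((((tag_map.map Prod.fst).toFinset \ seen.toFinset).card, queue.length) : Nat × Nat)
  decreasing_by
    all_goals simp_wf
    · exact Prod.Lex.right _ (Nat.lt_succ_self _)
    · rename_i h2
      by_cases hk : t ∈ tag_map.map Prod.fst
      · exact Prod.Lex.left _ _ (pvCard_lt tag_map seen t h2 hk)
      · rw [pvCard_eq tag_map seen t h2 hk, pvKids_of_not_mem tag_map t hk]
        exact Prod.Lex.right _ (by simp)

-- Phase 2: for t in tags: for v in tag_map.get(t, []): if not v.startswith('#'): concrete.add(v)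
def pvCollect (tag_map : List (String × List String)) (concrete : PySem.Set String) :
    List String → PySem.Set String
  | [] => concrete
  | t :: ts =>
      pvCollect tag_map
        ((pvKids tag_map t).foldl
          (fun acc v => if pvIsTag v then acc else PySem.Set.add acc v) concrete) ts

def resolve_biome_selectors_alt (selectors : List String) (tag_map : List (String × List String)) : List String :=
  let tags := pvBfs tag_map PySem.Set.empty [] (selectors.filter (fun s => pvIsTag s))
  let concrete0 := selectors.foldl
    (fun acc s => if pvIsTag s then acc else PySem.Set.add acc s) PySem.Set.empty
  PySem.List.sorted (pvCollect tag_map concrete0 tags) (fun x => x) false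

-- ===== PRECONDITION & SPEC =====
def Spec_resolve_biome_selectors (selectors : List String) (tag_map : List (String × List String)) (out : List String) : Prop := out = resolve_biome_selectors_alt selectors tag_map
instance (selectors : List String) (tag_map : List (String × List String)) (out : List String) : Decidable (Spec_resolve_biome_selectors selectors tag_map out) := by unfold Spec_resolve_biome_selectors; infer_instance

-- ===== CLAIM (what is proved, stated in full; the proofs are below) =====
def Claim_equal_resolve_biome_selectors : Prop := ∀ (selectors : List String) (tag_map : List (String × List String)), Dom_resolve_biome_selectors selectors tag_map → Spec_resolve_biome_selectors selectors tag_map (resolve_biome_selectors selectors tag_map)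

-- ===== LEMMAS AND PROOFS =====

-- c is a concrete id reachable from x while avoiding the tags in V (A's path-guarded relation)
inductive pvRA (tag_map : List (String × List String)) : List String → String → String → Prop
  | base (V : List String) (sel : String) :
      ¬ PySem.Str.startswith sel "#" = true → pvRA tag_map V sel sel
  | step (V : List String) (sel v c : String) :
      PySem.Str.startswith sel "#" = true → sel ∉ V → v ∈ pvKids tag_map sel →
      pvRA tag_map (sel :: V) v c → pvRA tag_map V sel c

theorem pvRA_mono (tag_map : List (String × List String)) {V V' : List String} {x c : String}
    (h : ∀ a, a ∈ V → a ∈ V') (hra : pvRA tag_map V' x c) : pvRA tag_map V x c := by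
  induction hra generalizing V with
  | base W sel hs => exact pvRA.base V sel hs
  | step W sel v c hs hnot hv hrec ih =>
      exact pvRA.step V sel v c hs (fun hm => hnot (h sel hm)) hv
        (ih (fun a ha => by rcases List.mem_cons.mp ha with h' | h'
                            · exact h' ▸ List.mem_cons_self
                            · exact List.mem_cons_of_mem _ (h a h')))

theorem pvRA_congr (tag_map : List (String × List String)) {V V' : List String} {x c : String}
    (h : ∀ a, a ∈ V ↔ a ∈ V') : pvRA tag_map V x c ↔ pvRA tag_map V' x c :=
  ⟨pvRA_mono tag_map (fun a ha => (h a).mpr ha), pvRA_mono tag_map (fun a ha => (h a).mp ha)⟩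

theorem pvRA_tag_mem_elim (tag_map : List (String × List String)) {V : List String} {sel c : String}
    (hs : PySem.Str.startswith sel "#" = true) (hmem : sel ∈ V)
    (hra : pvRA tag_map V sel c) : False := by
  cases hra with
  | base _ _ hs' => exact hs' hs
  | step _ _ v _ _ hnot => exact hnot hmem

theorem pvRA_concrete_iff (tag_map : List (String × List String)) {V : List String} {sel c : String}
    (hs : ¬ PySem.Str.startswith sel "#" = true) :
    pvRA tag_map V sel c ↔ c = sel := by
  constructor
  · intro hra
    cases hra with
    | base => rfl
    | step _ _ v _ hs' => exact absurd hs' hs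
  · rintro rfl; exact pvRA.base V _ hs

theorem pvRA_tag_iff (tag_map : List (String × List String)) {V : List String} {sel c : String}
    (hs : PySem.Str.startswith sel "#" = true) (hnot : sel ∉ V) :
    pvRA tag_map V sel c ↔ ∃ v ∈ pvKids tag_map sel, pvRA tag_map (sel :: V) v c := by
  constructor
  · intro hra
    cases hra with
    | base _ _ hs' => exact absurd hs hs'
    | step _ _ v _ _ _ hv hrec => exact ⟨v, hv, hrec⟩
  · rintro ⟨v, hv, hrec⟩
    exact pvRA.step V sel v c hs hnot hv hrec

theorem pvRA_add_iff (tag_map : List (String × List String)) (V : List String) (sel : String)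
    {x c : String} :
    pvRA tag_map (PySem.Set.add V sel) x c ↔ pvRA tag_map (sel :: V) x c :=
  pvRA_congr tag_map (fun a => by
    simp only [PySem.Set.mem_add, List.mem_cons]; tauto)

theorem mem_pvExpandA (tag_map : List (String × List String)) (visiting resolved : PySem.Set String)
    (sels : List String) (c : String) :
    c ∈ pvExpandA tag_map visiting resolved sels ↔
      c ∈ resolved ∨ ∃ s ∈ sels, pvRA tag_map visiting s c := by
  induction visiting, resolved, sels using pvExpandA.induct tag_map with
  | case1 visiting resolved =>
      simp [pvExpandA]
  | case2 visiting resolved sel rest hs hmem ih =>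
      rw [pvExpandA, if_pos hs, if_pos hmem, ih]
      constructor
      · rintro (h | ⟨s, hsr, hra⟩)
        · exact Or.inl h
        · exact Or.inr ⟨s, List.mem_cons_of_mem _ hsr, hra⟩
      · rintro (h | ⟨s, hsr, hra⟩)
        · exact Or.inl h
        · rcases List.mem_cons.mp hsr with rfl | hsr'
          · exact absurd hra (fun hra => pvRA_tag_mem_elim tag_map hs hmem hra)
          · exact Or.inr ⟨s, hsr', hra⟩
  | case3 visiting resolved sel rest hs hnot ih1 ih2 =>
      rw [pvExpandA, if_pos hs, if_neg hnot, ih2, ih1]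
      have hsel : (∃ v ∈ pvKids tag_map sel, pvRA tag_map (PySem.Set.add visiting sel) v c) ↔
          pvRA tag_map visiting sel c := by
        rw [pvRA_tag_iff tag_map hs hnot]
        exact exists_congr (fun v => and_congr_right
          (fun _ => pvRA_add_iff tag_map visiting sel))
      constructor
      · rintro ((h | hkids) | ⟨s, hsr, hra⟩)
        · exact Or.inl h
        · exact Or.inr ⟨sel, List.mem_cons_self, hsel.mp hkids⟩
        · exact Or.inr ⟨s, List.mem_cons_of_mem _ hsr, hra⟩
      · rintro (h | ⟨s, hsr, hra⟩)
        · exact Or.inl (Or.inl h)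
        · rcases List.mem_cons.mp hsr with rfl | hsr'
          · exact Or.inl (Or.inr (hsel.mpr hra))
          · exact Or.inr ⟨s, hsr', hra⟩
  | case4 visiting resolved sel rest hs ih =>
      rw [pvExpandA, if_neg hs, ih]
      simp only [PySem.Set.mem_add, List.mem_cons]
      constructor
      · rintro ((h | rfl) | ⟨s, hsr, hra⟩)
        · exact Or.inl h
        · exact Or.inr ⟨c, Or.inl rfl, pvRA.base _ _ hs⟩
        · exact Or.inr ⟨s, Or.inr hsr, hra⟩
      · rintro (h | ⟨s, hsr, hra⟩)
        · exact Or.inl (Or.inl h)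
        · rcases hsr with rfl | hsr'
          · exact Or.inl (Or.inr ((pvRA_concrete_iff tag_map hs).mp hra))
          · exact Or.inr ⟨s, hsr', hra⟩

theorem nodup_pvExpandA (tag_map : List (String × List String)) (visiting resolved : PySem.Set String)
    (sels : List String) (h : resolved.Nodup) : (pvExpandA tag_map visiting resolved sels).Nodup := by
  induction visiting, resolved, sels using pvExpandA.induct tag_map with
  | case1 visiting resolved => simpa [pvExpandA] using h
  | case2 visiting resolved sel rest hs hmem ih => rw [pvExpandA, if_pos hs, if_pos hmem]; exact ih h
  | case3 visiting resolved sel rest hs hnot ih1 ih2 => rw [pvExpandA, if_pos hs, if_neg hnot]; exact ih2 (ih1 h)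
  | case4 visiting resolved sel rest hs ih => rw [pvExpandA, if_neg hs]; exact ih (PySem.Set.nodup_add _ _ h)

-- w is a tag reachable from t along tag edges while avoiding the tags in V
inductive pvTR (tag_map : List (String × List String)) : List String → String → String → Prop
  | refl (V : List String) (t : String) : t ∉ V → pvTR tag_map V t t
  | step (V : List String) (t u w : String) : t ∉ V → u ∈ pvKids tag_map t →
      pvIsTag u = true → pvTR tag_map (t :: V) u w → pvTR tag_map V t w

theorem pvTR_mono (tag_map : List (String × List String)) {V V' : List String} {x w : String}
    (h : ∀ a, a ∈ V → a ∈ V') (htr : pvTR tag_map V' x w) : pvTR tag_map V x w := by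
  induction htr generalizing V with
  | refl W t hnot => exact pvTR.refl V t (fun hm => hnot (h t hm))
  | step W t u w hnot hu hut hrec ih =>
      exact pvTR.step V t u w (fun hm => hnot (h t hm)) hu hut
        (ih (fun a ha => by rcases List.mem_cons.mp ha with h' | h'
                            · exact h' ▸ List.mem_cons_self
                            · exact List.mem_cons_of_mem _ (h a h')))

theorem pvTR_add_iff (tag_map : List (String × List String)) (V : List String) (t : String)
    {x w : String} :
    pvTR tag_map (PySem.Set.add V t) x w ↔ pvTR tag_map (t :: V) x w :=
  ⟨pvTR_mono tag_map (fun a ha => by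
      simp only [PySem.Set.mem_add, List.mem_cons] at ha ⊢; tauto),
   pvTR_mono tag_map (fun a ha => by
      simp only [PySem.Set.mem_add, List.mem_cons] at ha ⊢; tauto)⟩

theorem pvTR_mem_elim (tag_map : List (String × List String)) {V : List String} {t w : String}
    (hmem : t ∈ V) (htr : pvTR tag_map V t w) : False := by
  cases htr with
  | refl _ _ hnot => exact hnot hmem
  | step _ _ u _ hnot => exact hnot hmem

theorem pvTR_extend (tag_map : List (String × List String)) {V : List String} {x w : String}
    (htr : pvTR tag_map V x w) : ∀ s, s ∉ V →
    pvTR tag_map (s :: V) x w ∨ pvTR tag_map V s w := by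
  induction htr with
  | refl W t hnot =>
      intro s hsW
      by_cases hse : s = t
      · exact Or.inr (hse ▸ pvTR.refl W s hsW)
      · exact Or.inl (pvTR.refl (s :: W) t (by
          simp only [List.mem_cons, not_or]; exact ⟨fun h => hse h.symm, hnot⟩))
  | step W t u w hnot hu hut hrec ih =>
      intro s hsW
      by_cases hse : s = t
      · subst hse
        exact Or.inr (pvTR.step W s u w hnot hu hut hrec)
      · have hs' : s ∉ t :: W := by
          simp only [List.mem_cons, not_or]; exact ⟨hse, hsW⟩
        rcases ih s hs' with h1 | h2
        · refine Or.inl (pvTR.step (s :: W) t u w ?_ hu hut ?_)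
          · simp only [List.mem_cons, not_or]
            exact ⟨fun h => hse h.symm, hnot⟩
          · exact pvTR_mono tag_map (fun a ha => by simp only [List.mem_cons] at ha ⊢; tauto) h1
        · exact Or.inr (pvTR_mono tag_map (fun a ha => List.mem_cons_of_mem _ ha) h2)

-- membership in the BFS closure: exactly the tags already listed plus those tag-reachable
-- from the queue avoiding seen
theorem mem_pvBfs (tag_map : List (String × List String)) (seen : PySem.Set String)
    (tags : List String) (queue : List String) (w : String) :
    w ∈ pvBfs tag_map seen tags queue ↔
      w ∈ tags ∨ ∃ q ∈ queue, pvTR tag_map seen q w := by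
  induction seen, tags, queue using pvBfs.induct tag_map with
  | case1 seen tags => simp [pvBfs]
  | case2 seen tags t queue hmem ih =>
      rw [pvBfs, if_pos hmem, ih]
      constructor
      · rintro (h | ⟨q, hq, htr⟩)
        · exact Or.inl h
        · exact Or.inr ⟨q, List.mem_cons_of_mem _ hq, htr⟩
      · rintro (h | ⟨q, hq, htr⟩)
        · exact Or.inl h
        · rcases List.mem_cons.mp hq with rfl | hq'
          · exact absurd htr (fun htr => pvTR_mem_elim tag_map hmem htr)
          · exact Or.inr ⟨q, hq', htr⟩
  | case3 seen tags t queue hnot ih =>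
      rw [pvBfs, if_neg hnot, ih]
      constructor
      · rintro (h | ⟨q, hq, htr⟩)
        · rcases List.mem_append.mp h with h' | h'
          · exact Or.inl h'
          · exact Or.inr ⟨t, List.mem_cons_self, by
              have hwt := List.mem_singleton.mp h'
              rw [hwt]; exact pvTR.refl seen t hnot⟩
        · have htr' : pvTR tag_map (t :: seen) q w := (pvTR_add_iff tag_map seen t).mp htr
          rcases List.mem_append.mp hq with hr | hk
          · exact Or.inr ⟨q, List.mem_cons_of_mem _ hr,
              pvTR_mono tag_map (fun a ha => List.mem_cons_of_mem _ ha) htr'⟩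
          · have hk' := List.mem_filter.mp hk
            exact Or.inr ⟨t, List.mem_cons_self,
              pvTR.step seen t q w hnot hk'.1 (by simpa using hk'.2) htr'⟩
      · rintro (h | ⟨q, hq, htr⟩)
        · exact Or.inl (List.mem_append.mpr (Or.inl h))
        · have hfromt : pvTR tag_map seen t w →
              w ∈ tags ++ [t] ∨ ∃ q' ∈ queue ++ (pvKids tag_map t).filter (fun v => pvIsTag v),
                pvTR tag_map (PySem.Set.add seen t) q' w := by
            intro htw
            cases htw with
            | refl => exact Or.inl (List.mem_append.mpr (Or.inr (List.mem_singleton.mpr rfl)))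
            | step _ _ u _ _ hu hut hrec =>
                exact Or.inr ⟨u, List.mem_append.mpr (Or.inr
                  (List.mem_filter.mpr ⟨hu, by simpa using hut⟩)),
                  (pvTR_add_iff tag_map seen t).mpr hrec⟩
          rcases List.mem_cons.mp hq with rfl | hq'
          · exact hfromt htr
          · rcases pvTR_extend tag_map htr t hnot with h1 | h2
            · exact Or.inr ⟨q, List.mem_append.mpr (Or.inl hq'),
                (pvTR_add_iff tag_map seen t).mpr h1⟩
            · exact hfromt h2

-- membership in a 'add the non-tags' fold
theorem pvMem_foldl_addNonTag (xs : List String) (acc : PySem.Set String) (c : String) :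
    c ∈ xs.foldl (fun acc v => if pvIsTag v then acc else PySem.Set.add acc v) acc ↔
      c ∈ acc ∨ (c ∈ xs ∧ pvIsTag c = false) := by
  induction xs generalizing acc with
  | nil => simp
  | cons v xs ih =>
      rw [List.foldl_cons, ih]
      by_cases hv : pvIsTag v = true
      · rw [if_pos hv]
        constructor
        · rintro (h | h)
          · exact Or.inl h
          · exact Or.inr ⟨List.mem_cons_of_mem _ h.1, h.2⟩
        · rintro (h | ⟨hm, hc⟩)
          · exact Or.inl h
          · rcases List.mem_cons.mp hm with rfl | hm'
            · exact absurd hv (by simp [hc])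
            · exact Or.inr ⟨hm', hc⟩
      · rw [if_neg hv]
        simp only [PySem.Set.mem_add, List.mem_cons]
        constructor
        · rintro ((h | rfl) | h)
          · exact Or.inl h
          · exact Or.inr ⟨Or.inl rfl, by simpa using hv⟩
          · exact Or.inr ⟨Or.inr h.1, h.2⟩
        · rintro (h | ⟨(rfl | hm), hc⟩)
          · exact Or.inl (Or.inl h)
          · exact Or.inl (Or.inr rfl)
          · exact Or.inr ⟨hm, hc⟩

theorem pvNodup_foldl_addNonTag (xs : List String) (acc : PySem.Set String) (h : acc.Nodup) :
    (xs.foldl (fun acc v => if pvIsTag v then acc else PySem.Set.add acc v) acc).Nodup := by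
  induction xs generalizing acc with
  | nil => simpa using h
  | cons v xs ih =>
      rw [List.foldl_cons]
      by_cases hv : pvIsTag v = true
      · rw [if_pos hv]; exact ih _ h
      · rw [if_neg hv]; exact ih _ (PySem.Set.nodup_add _ _ h)

theorem mem_pvCollect (tag_map : List (String × List String)) (concrete : PySem.Set String)
    (tags : List String) (c : String) :
    c ∈ pvCollect tag_map concrete tags ↔
      c ∈ concrete ∨ ∃ t ∈ tags, c ∈ pvKids tag_map t ∧ pvIsTag c = false := by
  induction tags generalizing concrete with
  | nil => simp [pvCollect]
  | cons t ts ih =>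
      rw [pvCollect, ih, pvMem_foldl_addNonTag]
      constructor
      · rintro ((h | ⟨hm, hc⟩) | ⟨u, hu, hk, hc⟩)
        · exact Or.inl h
        · exact Or.inr ⟨t, List.mem_cons_self, hm, hc⟩
        · exact Or.inr ⟨u, List.mem_cons_of_mem _ hu, hk, hc⟩
      · rintro (h | ⟨u, hu, hk, hc⟩)
        · exact Or.inl (Or.inl h)
        · rcases List.mem_cons.mp hu with rfl | hu'
          · exact Or.inl (Or.inr ⟨hk, hc⟩)
          · exact Or.inr ⟨u, hu', hk, hc⟩

theorem nodup_pvCollect (tag_map : List (String × List String)) (concrete : PySem.Set String)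
    (tags : List String) (h : concrete.Nodup) : (pvCollect tag_map concrete tags).Nodup := by
  induction tags generalizing concrete with
  | nil => simpa [pvCollect] using h
  | cons t ts ih => rw [pvCollect]; exact ih _ (pvNodup_foldl_addNonTag _ _ h)

-- the bridge: for a tag s, A's path-guarded concrete reachability is exactly 'some tag w is
-- tag-reachable from s and c is a concrete child of w'
theorem pvRA_iff_pvTR (tag_map : List (String × List String)) {V : List String} {s c : String}
    (hs : pvIsTag s = true) :
    pvRA tag_map V s c ↔
      ∃ w, pvTR tag_map V s w ∧ c ∈ pvKids tag_map w ∧ pvIsTag c = false := by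
  constructor
  · intro h
    revert hs
    induction h with
    | base W sel hs' => intro hs; exact absurd hs (by simpa [pvIsTag] using hs')
    | step W sel v c hs' hnot hv hrec ih =>
        intro _
        by_cases hvt : pvIsTag v = true
        · obtain ⟨w, htr, hk, hc⟩ := ih hvt
          exact ⟨w, pvTR.step W sel v w hnot hv hvt htr, hk, hc⟩
        · have hcv : c = v := (pvRA_concrete_iff tag_map (by simpa [pvIsTag] using hvt)).mp hrec
          subst hcv
          exact ⟨sel, pvTR.refl W sel hnot, hv, by simpa using hvt⟩
  · rintro ⟨w, htr, hk, hc⟩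
    revert hs hk
    induction htr with
    | refl W t hnot =>
        intro hs hk
        exact pvRA.step W t c c (by simpa [pvIsTag] using hs) hnot hk
          (pvRA.base (t :: W) c (by simpa [pvIsTag] using hc))
    | step W t u w hnot hu hut hrec ih =>
        intro hs hk
        exact pvRA.step W t u c (by simpa [pvIsTag] using hs) hnot hu (ih hut hk)

-- ===== VERDICT (by name: the statement is the Claim_ definition above) =====
theorem resolve_biome_selectors_spec : Claim_equal_resolve_biome_selectors := by
  intro selectors tag_map _
  unfold Spec_resolve_biome_selectors resolve_biome_selectors resolve_biome_selectors_alt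
  rw [PySem.List.sorted_id_eq_sorted_id_iff_perm]
  have hB : (pvCollect tag_map
      (selectors.foldl (fun acc s => if pvIsTag s then acc else PySem.Set.add acc s) PySem.Set.empty)
      (pvBfs tag_map PySem.Set.empty [] (selectors.filter (fun s => pvIsTag s)))).Nodup :=
    nodup_pvCollect tag_map _ _
      (pvNodup_foldl_addNonTag selectors PySem.Set.empty (by simp [PySem.Set.empty]))
  rw [List.perm_ext_iff_of_nodup
    (nodup_pvExpandA tag_map PySem.Set.empty PySem.Set.empty selectors List.nodup_nil) hB]
  intro c
  rw [mem_pvExpandA, mem_pvCollect, pvMem_foldl_addNonTag]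
  constructor
  · rintro (h | ⟨s, hsm, hra⟩)
    · exact absurd h (by simp [PySem.Set.empty])
    · by_cases hst : pvIsTag s = true
      · obtain ⟨w, htr, hk, hc⟩ := (pvRA_iff_pvTR tag_map hst).mp hra
        refine Or.inr ⟨w, ?_, hk, hc⟩
        rw [mem_pvBfs]
        exact Or.inr ⟨s, List.mem_filter.mpr ⟨hsm, by simpa using hst⟩, htr⟩
      · have hcs : c = s := (pvRA_concrete_iff tag_map (by simpa [pvIsTag] using hst)).mp hra
        exact Or.inl (Or.inr ⟨hcs ▸ hsm, by simpa [hcs] using (by simpa using hst : pvIsTag s = false)⟩)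
  · rintro ((h | ⟨hm, hc⟩) | ⟨w, hw, hk, hc⟩)
    · exact absurd h (by simp [PySem.Set.empty])
    · exact Or.inr ⟨c, hm, pvRA.base _ c (by simpa [pvIsTag] using hc)⟩
    · rw [mem_pvBfs] at hw
      rcases hw with hw | ⟨q, hq, htr⟩
      · exact absurd hw (by simp)
      · have hq' := List.mem_filter.mp hq
        exact Or.inr ⟨q, hq'.1,
          (pvRA_iff_pvTR tag_map (by simpa using hq'.2)).mpr ⟨w, htr, hk, hc⟩⟩
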